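-- pv_equiv track=rewrite | github.com/zen-mapper/zen-mapper | src/zen_mapper/simplex.py | locate_facets
-- ===== SOURCE A (Python) =====
-- def locate_facets(simplex: list[int]) -> list[list[int]]:
--     """Find all facets (faces of codimension 1) of a simplex."""
--     if not simplex:
--         return []
--
--     # vertices return the empty simplex as its only facet
--     if len(simplex) == 1:
--         return [[]]
--
--     # generate facets by removing one vertex at a time
--     facets = []
--     for i in range(len(simplex)):
--         facet = simplex[:i] + simplex[i+1:]  # remove i-th vertex
--         facets.append(facet)
--
--     return facets
-- ===== SOURCE B (Python) =====
-- import itertools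
--
-- def locate_facets(simplex: list[int]) -> list[list[int]]:
--     """Find all facets (faces of codimension 1) of a simplex."""
--     if not simplex:
--         return []
--     return [list(f) for f in reversed(list(itertools.combinations(simplex, len(simplex) - 1)))]
-- ===== Notes on version B (the rewrite author's own statement) =====
-- stated objective: idiomatic
-- what changed: Facets are enumerated with itertools.combinations(simplex, n-1) (reversed to match A's omit-first-vertex-first order) instead of an explicit index loop building each facet from two slices.
import Mathlib
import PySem

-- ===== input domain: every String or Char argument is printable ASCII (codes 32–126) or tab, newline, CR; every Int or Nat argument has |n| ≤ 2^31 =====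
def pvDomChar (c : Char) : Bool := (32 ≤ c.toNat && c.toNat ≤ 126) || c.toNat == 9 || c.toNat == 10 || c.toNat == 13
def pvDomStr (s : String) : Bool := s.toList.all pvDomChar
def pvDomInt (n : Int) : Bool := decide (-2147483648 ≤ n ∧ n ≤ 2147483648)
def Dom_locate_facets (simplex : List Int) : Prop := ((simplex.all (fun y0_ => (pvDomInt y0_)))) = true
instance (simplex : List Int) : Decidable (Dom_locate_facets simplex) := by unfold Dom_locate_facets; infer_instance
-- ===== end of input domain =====

-- B replaces A's explicit index loop (facet = two slices per index) by enumerating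
-- (n-1)-element combinations, reversed to match A's omit-first-vertex-first order (idiomatic).

-- ===== PORT A =====
-- literal transliteration of A: empty guard, singleton guard, then a loop over
-- range(len(simplex)) appending simplex[:i] + simplex[i+1:] to the accumulator.
def locate_facets (simplex : List Int) : List (List Int) :=
  if simplex = [] then []
  else if simplex.length = 1 then [[]]
  else
    (PySem.List.pyRange 0 (simplex.length : Int) 1).foldl
      (fun facets i =>
        facets ++ [PySem.List.slice simplex none (some i) ++ PySem.List.slice simplex (some (i + 1)) none])
      []

-- ===== PORT B =====
-- itertools.combinations(xs, k), in itertools' emission order, as structural recursion.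
def pvCombos (k : Nat) (xs : List Int) : List (List Int) :=
  match k, xs with
  | 0, _ => [[]]
  | _ + 1, [] => []
  | k + 1, x :: ys => (pvCombos k ys).map (fun t => x :: t) ++ pvCombos (k + 1) ys

def locate_facets_alt (simplex : List Int) : List (List Int) :=
  if simplex = [] then []
  else (pvCombos (simplex.length - 1) simplex).reverse

-- ===== PRECONDITION & SPEC =====
def Spec_locate_facets (simplex : List Int) (out : List (List Int)) : Prop := out = locate_facets_alt simplex
instance (simplex : List Int) (out : List (List Int)) : Decidable (Spec_locate_facets simplex out) := by unfold Spec_locate_facets; infer_instance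

-- ===== CLAIM (what is proved, stated in full; the proofs are below) =====
def Claim_equal_locate_facets : Prop := ∀ (simplex : List Int), Dom_locate_facets simplex → Spec_locate_facets simplex (locate_facets simplex)

-- ===== LEMMAS AND PROOFS =====

theorem pvFoldl_append_map (f : Int → List Int) :
    ∀ (l : List Int) (init : List (List Int)),
      l.foldl (fun acc i => acc ++ [f i]) init = init ++ l.map f := by
  intro l
  induction l with
  | nil => simp
  | cons x xs ih => intro init; simp [List.foldl, ih]

theorem pvCombos_gt : ∀ (xs : List Int) (k : Nat), xs.length < k → pvCombos k xs = [] := by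
  intro xs
  induction xs with
  | nil => intro k hk; match k, hk with | n + 1, _ => simp [pvCombos]
  | cons x ys ih =>
    intro k hk
    match k, hk with
    | n + 1, hk =>
      have h1 : ys.length < n := by simpa using hk
      simp [pvCombos, ih n h1, ih (n + 1) (by omega)]

theorem pvCombos_full : ∀ (xs : List Int), pvCombos xs.length xs = [xs] := by
  intro xs
  induction xs with
  | nil => simp [pvCombos]
  | cons x ys ih => simp [pvCombos, ih, pvCombos_gt ys (ys.length + 1) (by omega)]

theorem pvCombos_facets :
    ∀ (ys : List Int) (x : Int),
      pvCombos ys.length (x :: ys)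
        = (((List.range (ys.length + 1)).map (fun i => (x :: ys).eraseIdx i)).reverse) := by
  intro ys
  induction ys with
  | nil => intro x; simp [pvCombos]
  | cons y zs ih =>
    intro x
    have h2 : pvCombos (zs.length + 1) (y :: zs) = [y :: zs] := by simpa using pvCombos_full (y :: zs)
    show pvCombos (zs.length + 1) (x :: y :: zs) = _
    have : pvCombos (zs.length + 1) (x :: y :: zs)
        = (pvCombos zs.length (y :: zs)).map (fun t => x :: t) ++ pvCombos (zs.length + 1) (y :: zs) := by
      simp [pvCombos]
    rw [this, ih y, h2]
    simp only [List.length_cons]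
    simp [List.range_succ_eq_map, List.map_map, List.map_reverse, Function.comp]

theorem locate_facets_eraseIdx (xs : List Int) (h : xs ≠ []) :
    locate_facets xs = (List.range xs.length).map (fun i => xs.eraseIdx i) := by
  by_cases h1 : xs.length = 1
  · match xs, h1 with
    | [a], _ => simp [locate_facets]
  · unfold locate_facets
    rw [if_neg h, if_neg h1, pvFoldl_append_map, PySem.List.pyRange_one]
    simp only [sub_zero, Int.toNat_natCast, List.map_map]
    refine List.map_congr_left (fun k _ => ?_)
    simp only [Function.comp, zero_add]
    have hk1 : (k : Int) + 1 = ((k + 1 : Nat) : Int) := by push_cast; ring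
    rw [PySem.List.slice_to_natCast, hk1, PySem.List.slice_from_natCast,
      List.eraseIdx_eq_take_drop_succ]

-- ===== VERDICT (by name: the statement is the Claim_ definition above) =====
theorem locate_facets_spec : Claim_equal_locate_facets := by
  intro xs _
  unfold Spec_locate_facets locate_facets_alt
  by_cases h : xs = []
  · simp [h, locate_facets]
  · rw [if_neg h, locate_facets_eraseIdx xs h]
    match xs, h with
    | x :: ys, _ =>
      have := pvCombos_facets ys x
      simp only [List.length_cons, Nat.add_sub_cancel]
      rw [this, List.reverse_reverse]
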